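-- pv_equiv track=rewrite | github.com/romeorizzi/temi_prog_public | 2018.12.05.provetta/all-CMS-submissions-2018-12-05/2018-12-05.13:07:50.692619.VR429697.rank_unrank_ABstrings.py | ABstring2rank
-- ===== SOURCE A (Python) =====
-- def ABstring2rank(s):
--     m=0
--     for i in range(0, len(s)):
--         if s[i]=='A':
--             m=m+0
--         if s[i]=='B':
--             m=m+2**(len(s)-i-1)
--     return m
-- ===== SOURCE B (Python) =====
-- def ABstring2rank(s):
--     m = 0
--     for c in s:
--         m = m * 2 + (1 if c == 'B' else 0)
--     return m
-- ===== Notes on version B (the rewrite author's own statement) =====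
-- stated objective: simpler
-- what changed: Replaces the per-position positional-weight sum (2**(len(s)-i-1) recomputed at each index) with Horner's method: a single left-to-right pass maintaining a running value m = m*2 + bit, with no indexing and no power computation.
import Mathlib
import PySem

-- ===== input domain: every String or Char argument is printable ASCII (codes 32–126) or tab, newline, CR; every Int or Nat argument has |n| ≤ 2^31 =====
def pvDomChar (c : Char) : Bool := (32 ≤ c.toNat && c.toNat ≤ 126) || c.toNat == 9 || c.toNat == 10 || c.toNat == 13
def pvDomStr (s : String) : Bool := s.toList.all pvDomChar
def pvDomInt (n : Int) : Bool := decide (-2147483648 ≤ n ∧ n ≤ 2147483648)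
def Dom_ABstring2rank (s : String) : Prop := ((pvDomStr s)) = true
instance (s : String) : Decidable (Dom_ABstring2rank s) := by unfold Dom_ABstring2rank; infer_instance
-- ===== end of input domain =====

-- B replaces A's per-index positional-weight sum with a Horner-style running accumulator (simpler, no indexing/powers).

-- ===== PORT A =====
-- s[i] is always in range (0 ≤ i < len s), so the default of pyGetD is never used.
def ABstring2rank (s : String) : Int :=
  let n : Int := PySem.Str.len s
  (PySem.List.pyRange 0 n).foldl
    (fun m i =>
      let c := PySem.List.pyGetD s.toList i ' '
      let m := if c = 'A' then m + 0 else m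
      if c = 'B' then m + 2 ^ (n - i - 1).toNat else m) 0

-- ===== PORT B =====
def ABstring2rank_alt (s : String) : Int :=
  s.toList.foldl (fun m c => m * 2 + (if c = 'B' then 1 else 0)) 0

-- ===== PRECONDITION & SPEC =====
def Spec_ABstring2rank (s : String) (out : Int) : Prop := out = ABstring2rank_alt s
instance (s : String) (out : Int) : Decidable (Spec_ABstring2rank s out) := by unfold Spec_ABstring2rank; infer_instance

-- ===== CLAIM (what is proved, stated in full; the proofs are below) =====
def Claim_equal_ABstring2rank : Prop := ∀ (s : String), Dom_ABstring2rank s → Spec_ABstring2rank s (ABstring2rank s)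

-- ===== LEMMAS AND PROOFS =====

-- the positional-weight sum over the index range equals the Horner value
theorem pv_sum_eq_horner (l : List Char) :
    ((List.range l.length).map
      (fun k => if l.getD k ' ' = 'B' then (2:Int) ^ (l.length - 1 - k) else 0)).sum
    = l.foldl (fun m c => m * 2 + (if c = 'B' then 1 else 0)) 0 := by
  induction l using List.reverseRecOn with
  | nil => simp
  | append_singleton l c ih =>
    rw [List.foldl_append]
    simp only [List.length_append, List.length_cons, List.length_nil]
    rw [List.range_succ, List.map_append, List.sum_append]
    have hmap : (List.range l.length).map
        (fun k => if (l ++ [c]).getD k ' ' = 'B' then (2:Int) ^ (l.length + 1 - 1 - k) else 0)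
        = (List.range l.length).map
        (fun k => 2 * (if l.getD k ' ' = 'B' then (2:Int) ^ (l.length - 1 - k) else 0)) := by
      apply List.map_congr_left
      intro k hk
      rw [List.mem_range] at hk
      have hget : (l ++ [c]).getD k ' ' = l.getD k ' ' := by
        simp [List.getD, List.getElem?_append_left hk]
      have hexp : l.length + 1 - 1 - k = (l.length - 1 - k) + 1 := by omega
      rw [hget, hexp]
      split_ifs <;> ring
    rw [hmap, List.sum_map_mul_left, ih]
    simp
    ring

-- A's fold step is an additive step: rewrite and evaluate the sum
theorem pv_A_eq_horner (s : String) :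
    ABstring2rank s
    = s.toList.foldl (fun m c => m * 2 + (if c = 'B' then 1 else 0)) 0 := by
  unfold ABstring2rank
  show (PySem.List.pyRange 0 (PySem.Str.len s)).foldl
      (fun m i =>
        let c := PySem.List.pyGetD s.toList i ' '
        let m := if c = 'A' then m + 0 else m
        if c = 'B' then m + 2 ^ (PySem.Str.len s - i - 1).toNat else m) 0 = _
  have hstep : (fun (m : Int) (i : Int) =>
      let c := PySem.List.pyGetD s.toList i ' '
      let m := if c = 'A' then m + 0 else m
      if c = 'B' then m + 2 ^ (PySem.Str.len s - i - 1).toNat else m)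
      = (fun (m : Int) (i : Int) =>
        m + (if PySem.List.pyGetD s.toList i ' ' = 'B'
             then (2:Int) ^ (PySem.Str.len s - i - 1).toNat else 0)) := by
    funext m i
    simp only []
    split_ifs <;> simp
  rw [hstep, PySem.List.foldl_add]
  have hlen : PySem.Str.len s = ((s.toList.length : Nat) : Int) := by
    simp [PySem.Str.len_eq]
  rw [hlen, PySem.List.pyRange_zero_natCast, List.map_map, ← pv_sum_eq_horner s.toList]
  rw [Int.zero_add]
  congr 1
  apply List.map_congr_left
  intro k hk
  rw [List.mem_range] at hk
  simp only [Function.comp]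
  rw [PySem.List.pyGetD_natCast]
  have : ((s.toList.length : Int) - (k : Int) - 1).toNat = s.toList.length - 1 - k := by omega
  rw [this]

-- ===== VERDICT (by name: the statement is the Claim_ definition above) =====
theorem ABstring2rank_spec : Claim_equal_ABstring2rank := by
  intro s _
  unfold Spec_ABstring2rank ABstring2rank_alt
  exact pv_A_eq_horner s
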